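-- pv_equiv track=rewrite | github.com/skyler-myers-db/databricks-demos | data_api_serving/resources/serving/api_model_customers.py | _build_keyset_where
-- ===== SOURCE A (Python) =====
-- from typing import Any, Dict, List, Tuple, Optional
--
-- ALLOWED_COLS = {
--     "customer_id": "customer_id",
--     "name": "name",
--     "email": "email",
--     "ip_addr": "ip_addr",
--     "phone": "phone",
--     "modified_ts": "modified_ts",
-- }
--
-- COL_TYPES = {
--     "customer_id": "BIGINT",
--     "name": "STRING",
--     "email": "STRING",
--     "ip_addr": "STRING",
--     "phone": "STRING",
--     "modified_ts": "TIMESTAMP",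
-- }
--
-- def _sql_cast_param(col: str, pname: str) -> str:
--     t = COL_TYPES.get(col, "STRING").upper()
--     if t in ("BIGINT", "INT"):
--         return f"CAST(:{pname} AS BIGINT)"
--     if t in ("DOUBLE", "FLOAT", "DECIMAL"):
--         return f"CAST(:{pname} AS DOUBLE)"
--     if t == "TIMESTAMP":
--         return f"CAST(:{pname} AS TIMESTAMP)"
--     return f":{pname}"  # STRING (safe)
--
-- def _build_keyset_where(
--     keys: List[Tuple[str, str]], after_vals: List[Any]
-- ) -> Tuple[str, Dict[str, Any]]:
--     """
--     Lexicographic predicate for keyset pagination. Example for DESC/DESC: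
--       (modified_ts < :k0) OR (modified_ts = :k0 AND customer_id < :k1)
--     With explicit CASTs so strings compare as native types.
--     """
--     assert len(keys) == len(after_vals)
--     clauses = []
--     params: Dict[str, Any] = {}
--     for i in range(len(keys)):
--         parts = []
--         for j in range(i):
--             colj, _dirj = keys[j]
--             parts.append(f"{ALLOWED_COLS[colj]} = {_sql_cast_param(colj, f'k{j}')}")
--             params[f"k{j}"] = after_vals[j]
--         coli, diri = keys[i]
--         op = "<" if diri.upper() == "DESC" else ">"
--         parts.append(f"{ALLOWED_COLS[coli]} {op} {_sql_cast_param(coli, f'k{i}')}")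
--         params[f"k{i}"] = after_vals[i]
--         clauses.append("(" + " AND ".join(parts) + ")")
--     return " OR ".join(clauses), params
-- ===== SOURCE B (Python) =====
-- from typing import Any, Dict, List, Tuple
--
-- ALLOWED_COLS = {
--     "customer_id": "customer_id",
--     "name": "name",
--     "email": "email",
--     "ip_addr": "ip_addr",
--     "phone": "phone",
--     "modified_ts": "modified_ts",
-- }
--
-- COL_TYPES = {
--     "customer_id": "BIGINT",
--     "name": "STRING",
--     "email": "STRING",
--     "ip_addr": "STRING",
--     "phone": "STRING",
--     "modified_ts": "TIMESTAMP",
-- }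
--
-- def _sql_cast_param(col: str, pname: str) -> str:
--     t = COL_TYPES.get(col, "STRING").upper()
--     if t in ("BIGINT", "INT"):
--         return f"CAST(:{pname} AS BIGINT)"
--     if t in ("DOUBLE", "FLOAT", "DECIMAL"):
--         return f"CAST(:{pname} AS DOUBLE)"
--     if t == "TIMESTAMP":
--         return f"CAST(:{pname} AS TIMESTAMP)"
--     return f":{pname}"  # STRING (safe)
--
-- def _build_keyset_where(
--     keys: List[Tuple[str, str]], after_vals: List[Any]
-- ) -> Tuple[str, Dict[str, Any]]:
--     """Single pass with a running prefix of equality terms (no inner re-scan)."""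
--     assert len(keys) == len(after_vals)
--     clauses = []
--     params: Dict[str, Any] = {}
--     prefix: List[str] = []
--     for i, (col, direction) in enumerate(keys):
--         op = "<" if direction.upper() == "DESC" else ">"
--         cast = _sql_cast_param(col, f"k{i}")
--         clauses.append("(" + " AND ".join(prefix + [f"{ALLOWED_COLS[col]} {op} {cast}"]) + ")")
--         params[f"k{i}"] = after_vals[i]
--         prefix.append(f"{ALLOWED_COLS[col]} = {cast}")
--     return " OR ".join(clauses), params
-- ===== Notes on version B (the rewrite author's own statement) =====
-- stated objective: faster
-- what changed: Replaces A's nested loop (which rebuilds the equality-term prefix and re-inserts all earlier params on every outer iteration) with a single pass over enumerate(keys) that carries the prefix as a running accumulator.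
import Mathlib
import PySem

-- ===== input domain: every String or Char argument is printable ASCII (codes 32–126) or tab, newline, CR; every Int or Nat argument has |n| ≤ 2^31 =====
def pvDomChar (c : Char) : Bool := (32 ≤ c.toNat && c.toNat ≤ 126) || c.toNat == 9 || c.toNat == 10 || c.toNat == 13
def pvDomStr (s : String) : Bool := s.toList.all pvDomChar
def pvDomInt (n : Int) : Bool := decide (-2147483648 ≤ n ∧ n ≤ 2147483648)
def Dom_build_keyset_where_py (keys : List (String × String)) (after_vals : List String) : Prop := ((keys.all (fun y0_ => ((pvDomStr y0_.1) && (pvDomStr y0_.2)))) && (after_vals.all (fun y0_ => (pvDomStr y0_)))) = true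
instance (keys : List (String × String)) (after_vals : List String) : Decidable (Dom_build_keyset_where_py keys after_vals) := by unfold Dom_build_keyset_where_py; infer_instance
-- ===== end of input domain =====

-- B replaces A's quadratic inner j-loop (rebuilding the equality prefix each round) by a single pass
-- that carries the prefix as an accumulator; same return value (string and params dict).

-- ===== PORT A =====
def pvAllowedCols : PySem.Dict String String := PySem.Dict.mk
  [("customer_id","customer_id"),("name","name"),("email","email"),
   ("ip_addr","ip_addr"),("phone","phone"),("modified_ts","modified_ts")]

def pvColTypes : PySem.Dict String String := PySem.Dict.mk
  [("customer_id","BIGINT"),("name","STRING"),("email","STRING"),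
   ("ip_addr","STRING"),("phone","STRING"),("modified_ts","TIMESTAMP")]

-- _sql_cast_param: COL_TYPES.get(col, "STRING").upper(), then the chain of membership tests
def pvSqlCastParam (col pname : String) : String :=
  let t := PySem.Str.upper (PySem.Dict.getD pvColTypes col "STRING")
  if t = "BIGINT" ∨ t = "INT" then "CAST(:" ++ pname ++ " AS BIGINT)"
  else if t = "DOUBLE" ∨ t = "FLOAT" ∨ t = "DECIMAL" then "CAST(:" ++ pname ++ " AS DOUBLE)"
  else if t = "TIMESTAMP" then "CAST(:" ++ pname ++ " AS TIMESTAMP)"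
  else ":" ++ pname

-- A: outer loop over range(len(keys)); inner loop over range(i) re-building the equality prefix and
-- re-inserting the earlier params each round.  ALLOWED_COLS[c] (KeyError) and the assert are excluded
-- by Pre_; on Pre_ the total forms getD "" / pyGetD … "" are exact.
def build_keyset_where_py (keys : List (String × String)) (after_vals : List String) : String × (List (String × String)) :=
  let res := (PySem.List.pyRange 0 (PySem.List.len keys)).foldl
    (fun (st : List String × PySem.Dict String String) i =>
      let inner := (PySem.List.pyRange 0 i).foldl
        (fun (st2 : List String × PySem.Dict String String) j =>
          (st2.1 ++ [PySem.Dict.getD pvAllowedCols (PySem.List.pyGetD keys j ("", "")).1 "" ++ " = " ++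
                      pvSqlCastParam (PySem.List.pyGetD keys j ("", "")).1 ("k" ++ PySem.Int.toStr j)],
           st2.2.insert ("k" ++ PySem.Int.toStr j) (PySem.List.pyGetD after_vals j "")))
        ([], st.2)
      (st.1 ++ ["(" ++ PySem.Str.join " AND "
                  (inner.1 ++ [PySem.Dict.getD pvAllowedCols (PySem.List.pyGetD keys i ("", "")).1 "" ++ " " ++
                               (if PySem.Str.upper (PySem.List.pyGetD keys i ("", "")).2 = "DESC" then "<" else ">") ++ " " ++
                               pvSqlCastParam (PySem.List.pyGetD keys i ("", "")).1 ("k" ++ PySem.Int.toStr i)]) ++ ")"],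
       inner.2.insert ("k" ++ PySem.Int.toStr i) (PySem.List.pyGetD after_vals i "")))
    ([], PySem.Dict.empty)
  (PySem.Str.join " OR " res.1, res.2.items)

-- ===== PORT B =====
-- B: one pass over enumerate(keys), state = (clauses, params, prefix); the prefix of equality terms
-- grows by one term per iteration instead of being recomputed.
def build_keyset_where_py_alt (keys : List (String × String)) (after_vals : List String) : String × (List (String × String)) :=
  let res := (PySem.List.enumerate keys).foldl
    (fun (st : List String × PySem.Dict String String × List String) p =>
      (st.1 ++ ["(" ++ PySem.Str.join " AND "
                  (st.2.2 ++ [PySem.Dict.getD pvAllowedCols p.2.1 "" ++ " " ++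
                              (if PySem.Str.upper p.2.2 = "DESC" then "<" else ">") ++ " " ++
                              pvSqlCastParam p.2.1 ("k" ++ PySem.Int.toStr p.1)]) ++ ")"],
       st.2.1.insert ("k" ++ PySem.Int.toStr p.1) (PySem.List.pyGetD after_vals p.1 ""),
       st.2.2 ++ [PySem.Dict.getD pvAllowedCols p.2.1 "" ++ " = " ++
                  pvSqlCastParam p.2.1 ("k" ++ PySem.Int.toStr p.1)]))
    ([], PySem.Dict.empty, [])
  (PySem.Str.join " OR " res.1, res.2.1.items)

-- ===== PRECONDITION & SPEC =====
-- Pre_ excludes exactly where the Python A raises: mismatched lengths (the assert) and a key column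
-- not in ALLOWED_COLS (KeyError on ALLOWED_COLS[col]).
def Pre_build_keyset_where_py (keys : List (String × String)) (after_vals : List String) : Prop :=
  keys.length = after_vals.length ∧ ∀ p ∈ keys, pvAllowedCols.contains p.1 = true
instance (keys : List (String × String)) (after_vals : List String) : Decidable (Pre_build_keyset_where_py keys after_vals) := by unfold Pre_build_keyset_where_py; infer_instance

def pvWitness_build_keyset_where_py : (List (String × String)) × List String :=
  ([("modified_ts", "DESC"), ("customer_id", "DESC")], ["2024-01-01", "9"])

def Spec_build_keyset_where_py (keys : List (String × String)) (after_vals : List String) (out : String × (List (String × String))) : Prop := out = build_keyset_where_py_alt keys after_vals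
instance (keys : List (String × String)) (after_vals : List String) (out : String × (List (String × String))) : Decidable (Spec_build_keyset_where_py keys after_vals out) := by unfold Spec_build_keyset_where_py; infer_instance

-- ===== CLAIM (what is proved, stated in full; the proofs are below) =====
def Claim_equal_build_keyset_where_py : Prop := ∀ (keys : List (String × String)) (after_vals : List String), Dom_build_keyset_where_py keys after_vals → Pre_build_keyset_where_py keys after_vals → Spec_build_keyset_where_py keys after_vals (build_keyset_where_py keys after_vals)

-- ===== LEMMAS AND PROOFS =====

-- reference terms both ports are reduced to
def pvPk (j : Nat) : String := "k" ++ PySem.Int.toStr (j : Int)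

def pvEqT (keys : List (String × String)) (j : Nat) : String :=
  PySem.Dict.getD pvAllowedCols (keys.getD j ("", "")).1 "" ++ " = " ++
    pvSqlCastParam (keys.getD j ("", "")).1 (pvPk j)

def pvCmpT (keys : List (String × String)) (j : Nat) : String :=
  PySem.Dict.getD pvAllowedCols (keys.getD j ("", "")).1 "" ++ " " ++
    (if PySem.Str.upper (keys.getD j ("", "")).2 = "DESC" then "<" else ">") ++ " " ++
    pvSqlCastParam (keys.getD j ("", "")).1 (pvPk j)

def pvClause (keys : List (String × String)) (j : Nat) : String :=
  "(" ++ PySem.Str.join " AND " ((List.range j).map (pvEqT keys) ++ [pvCmpT keys j]) ++ ")"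

def pvParams (a : List String) (m : Nat) : List (String × String) :=
  (List.range m).map (fun j => (pvPk j, a.getD j ""))

-- str(n) is injective on naturals
lemma pv_dc_inj : ∀ a < 10, ∀ b < 10, Nat.digitChar a = Nat.digitChar b → a = b := by decide

lemma pv_toDigits10_inj : ∀ (a b : Nat), Nat.toDigits 10 a = Nat.toDigits 10 b → a = b := by
  intro a
  induction a using Nat.strong_induction_on with
  | _ a IH =>
    intro b h
    have ht : ∀ n : Nat, Nat.toDigits 10 n =
        if n < 10 then [n.digitChar] else Nat.toDigits 10 (n / 10) ++ [(n % 10).digitChar] :=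
      fun n => Nat.toDigits_eq_if (by norm_num)
    rw [ht a, ht b] at h
    by_cases ha : a < 10 <;> by_cases hb : b < 10
    · rw [if_pos ha, if_pos hb] at h
      exact pv_dc_inj a ha b hb (List.singleton_injective h)
    · rw [if_pos ha, if_neg hb] at h
      have hl := congrArg List.length h
      have := Nat.length_toDigits_pos (b := 10) (n := b / 10)
      simp only [List.length_append, List.length_cons,
        List.length_nil] at hl
      omega
    · rw [if_neg ha, if_pos hb] at h
      have hl := congrArg List.length h
      have := Nat.length_toDigits_pos (b := 10) (n := a / 10)
      simp only [List.length_append, List.length_cons,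
        List.length_nil] at hl
      omega
    · rw [if_neg ha, if_neg hb] at h
      obtain ⟨h1, h2⟩ := List.append_inj' h (by simp)
      have hdiv : a / 10 = b / 10 := IH (a / 10) (Nat.div_lt_self (by omega) (by norm_num)) _ h1
      have hmod : a % 10 = b % 10 :=
        pv_dc_inj _ (Nat.mod_lt _ (by norm_num)) _ (Nat.mod_lt _ (by norm_num))
          (List.singleton_injective h2)
      omega

lemma pv_toChars_natCast (a : Nat) : PySem.Int.toChars (a : Int) = Nat.toDigits 10 a := by
  unfold PySem.Int.toChars
  rw [if_neg (by omega)]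
  simp

lemma pvPk_inj {a b : Nat} (h : pvPk a = pvPk b) : a = b := by
  have h2 := congrArg String.toList h
  simp only [pvPk, String.toList_append, PySem.Int.toList_toStr, pv_toChars_natCast] at h2
  exact pv_toDigits10_inj a b (List.append_cancel_left h2)

lemma pv_keys_pvParams (a : List String) (m : Nat) :
    (PySem.Dict.mk (pvParams a m)).keys = (List.range m).map pvPk := by
  simp [pvParams, PySem.Dict.keys_mk, List.map_map, Function.comp_def]

lemma pv_contains_pvParams (a : List String) (m j : Nat) :
    (PySem.Dict.mk (pvParams a m)).contains (pvPk j) = decide (j < m) := by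
  rw [PySem.Dict.contains_eq_decide_mem_keys, pv_keys_pvParams]
  by_cases hj : j < m
  · simp [hj]
    exact ⟨j, hj, rfl⟩
  · simp [hj]
    intro x hx hpk
    exact absurd (pvPk_inj hpk) (by omega)

lemma pv_reinsert (a : List String) (m j : Nat) (hj : j < m) :
    (PySem.Dict.mk (pvParams a m)).insert (pvPk j) (a.getD j "") = PySem.Dict.mk (pvParams a m) := by
  apply PySem.Dict.ext
  rw [PySem.Dict.items_insert_of_contains _ _ (by rw [pv_contains_pvParams]; simp [hj])]
  show (pvParams a m).map _ = pvParams a m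
  unfold pvParams
  rw [List.map_map]
  refine List.map_congr_left ?_
  intro k hk
  simp only [Function.comp_apply]
  by_cases hkj : k = j
  · subst hkj; simp
  · have : (pvPk k == pvPk j) = false := by
      simp only [beq_eq_false_iff_ne, ne_eq]
      exact fun h => hkj (pvPk_inj h)
    simp [this]

lemma pv_insert_fresh (a : List String) (m : Nat) :
    (PySem.Dict.mk (pvParams a m)).insert (pvPk m) (a.getD m "") = PySem.Dict.mk (pvParams a (m + 1)) := by
  apply PySem.Dict.ext
  rw [PySem.Dict.items_insert_of_not_contains _ _ (by rw [pv_contains_pvParams]; simp)]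
  show pvParams a m ++ [(pvPk m, a.getD m "")] = pvParams a (m + 1)
  unfold pvParams
  rw [List.range_succ, List.map_append]
  rfl

-- A's inner loop: re-builds the equality terms and re-inserts already-present params (a no-op on the dict)
lemma pv_innerA (keys : List (String × String)) (after_vals : List String) (m : Nat) :
    ∀ (js : List Int), (∀ x ∈ js, 0 ≤ x ∧ x.toNat < m) → ∀ (parts0 : List String),
    js.foldl
      (fun (st2 : List String × PySem.Dict String String) j =>
        (st2.1 ++ [PySem.Dict.getD pvAllowedCols (PySem.List.pyGetD keys j ("", "")).1 "" ++ " = " ++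
                    pvSqlCastParam (PySem.List.pyGetD keys j ("", "")).1 ("k" ++ PySem.Int.toStr j)],
         st2.2.insert ("k" ++ PySem.Int.toStr j) (PySem.List.pyGetD after_vals j "")))
      (parts0, PySem.Dict.mk (pvParams after_vals m))
    = (parts0 ++ js.map (fun x => pvEqT keys x.toNat), PySem.Dict.mk (pvParams after_vals m)) := by
  intro js
  induction js with
  | nil => intro _ parts0; simp
  | cons j js ih =>
    intro h parts0
    obtain ⟨hj0, hjm⟩ := h j (by simp)
    obtain ⟨jn, rfl⟩ : ∃ jn : Nat, j = (jn : Int) := ⟨j.toNat, (Int.toNat_of_nonneg hj0).symm⟩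
    simp only [List.foldl_cons, PySem.List.pyGetD_natCast]
    rw [show ("k" ++ PySem.Int.toStr (jn : Int)) = pvPk jn from rfl,
        pv_reinsert after_vals m jn (by simpa using hjm)]
    rw [ih (fun x hx => h x (by simp [hx])) _]
    simp [pvEqT, pvPk]

-- A's outer loop produces the reference clauses and params
lemma pv_outerA (keys : List (String × String)) (after_vals : List String) (m : Nat) :
    (PySem.List.pyRange 0 (m : Int)).foldl
      (fun (st : List String × PySem.Dict String String) i =>
        let inner := (PySem.List.pyRange 0 i).foldl
          (fun (st2 : List String × PySem.Dict String String) j =>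
            (st2.1 ++ [PySem.Dict.getD pvAllowedCols (PySem.List.pyGetD keys j ("", "")).1 "" ++ " = " ++
                        pvSqlCastParam (PySem.List.pyGetD keys j ("", "")).1 ("k" ++ PySem.Int.toStr j)],
             st2.2.insert ("k" ++ PySem.Int.toStr j) (PySem.List.pyGetD after_vals j "")))
          ([], st.2)
        (st.1 ++ ["(" ++ PySem.Str.join " AND "
                    (inner.1 ++ [PySem.Dict.getD pvAllowedCols (PySem.List.pyGetD keys i ("", "")).1 "" ++ " " ++
                                 (if PySem.Str.upper (PySem.List.pyGetD keys i ("", "")).2 = "DESC" then "<" else ">") ++ " " ++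
                                 pvSqlCastParam (PySem.List.pyGetD keys i ("", "")).1 ("k" ++ PySem.Int.toStr i)]) ++ ")"],
         inner.2.insert ("k" ++ PySem.Int.toStr i) (PySem.List.pyGetD after_vals i "")))
      ([], PySem.Dict.empty)
    = ((List.range m).map (pvClause keys), PySem.Dict.mk (pvParams after_vals m)) := by
  induction m with
  | zero => simp [PySem.List.pyRange_one_eq_nil, pvParams, PySem.Dict.empty]
  | succ m ih =>
    rw [show ((m + 1 : Nat) : Int) = (m : Int) + 1 by push_cast; ring,
        PySem.List.pyRange_one_succ_right (by positivity), List.foldl_append, ih]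
    simp only [List.foldl_cons, List.foldl_nil]
    rw [pv_innerA keys after_vals m (PySem.List.pyRange 0 (m : Int))
          (fun x hx => by
            rw [PySem.List.mem_pyRange_one] at hx
            exact ⟨hx.1, by omega⟩) []]
    simp only [PySem.List.pyGetD_natCast, List.nil_append]
    rw [show ("k" ++ PySem.Int.toStr (m : Int)) = pvPk m from rfl, pv_insert_fresh]
    rw [show (PySem.List.pyRange 0 (m : Int)).map (fun x => pvEqT keys x.toNat)
          = (List.range m).map (pvEqT keys) by
        rw [PySem.List.pyRange_zero_nat, List.map_map]
        exact List.map_congr_left (fun k _ => by simp)]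
    rw [List.range_succ, List.map_append]
    rfl

-- B's single pass with the running prefix
lemma pv_outerB (keys : List (String × String)) (after_vals : List String) (m : Nat) :
    (PySem.List.pyRange 0 (m : Int)).foldl
      (fun (st : List String × PySem.Dict String String × List String) j =>
        (st.1 ++ ["(" ++ PySem.Str.join " AND "
                    (st.2.2 ++ [PySem.Dict.getD pvAllowedCols (j, PySem.List.pyGetD keys j ("", "")).2.1 "" ++ " " ++
                                (if PySem.Str.upper (j, PySem.List.pyGetD keys j ("", "")).2.2 = "DESC" then "<" else ">") ++ " " ++
                                pvSqlCastParam (j, PySem.List.pyGetD keys j ("", "")).2.1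
                                  ("k" ++ PySem.Int.toStr (j, PySem.List.pyGetD keys j ("", "")).1)]) ++ ")"],
         st.2.1.insert ("k" ++ PySem.Int.toStr (j, PySem.List.pyGetD keys j ("", "")).1)
           (PySem.List.pyGetD after_vals (j, PySem.List.pyGetD keys j ("", "")).1 ""),
         st.2.2 ++ [PySem.Dict.getD pvAllowedCols (j, PySem.List.pyGetD keys j ("", "")).2.1 "" ++ " = " ++
                    pvSqlCastParam (j, PySem.List.pyGetD keys j ("", "")).2.1
                      ("k" ++ PySem.Int.toStr (j, PySem.List.pyGetD keys j ("", "")).1)]))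
      ([], PySem.Dict.empty, [])
    = ((List.range m).map (pvClause keys), PySem.Dict.mk (pvParams after_vals m),
       (List.range m).map (pvEqT keys)) := by
  induction m with
  | zero => simp [PySem.List.pyRange_one_eq_nil, pvParams, PySem.Dict.empty]
  | succ m ih =>
    rw [show ((m + 1 : Nat) : Int) = (m : Int) + 1 by push_cast; ring,
        PySem.List.pyRange_one_succ_right (by positivity), List.foldl_append, ih]
    simp only [List.foldl_cons, List.foldl_nil, PySem.List.pyGetD_natCast]
    rw [show ("k" ++ PySem.Int.toStr (m : Int)) = pvPk m from rfl, pv_insert_fresh]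
    rw [List.range_succ, List.map_append, List.map_append]
    rfl

-- ===== VERDICT (by name: the statement is the Claim_ definition above) =====
theorem build_keyset_where_py_spec : Claim_equal_build_keyset_where_py := by
  intro keys after_vals _ _
  unfold Spec_build_keyset_where_py
  simp only [build_keyset_where_py, build_keyset_where_py_alt,
    PySem.List.enumerate_eq_map_pyRange keys ("", ""), List.foldl_map, PySem.List.len_eq]
  rw [pv_outerA keys after_vals keys.length, pv_outerB keys after_vals keys.length]
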